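-- pv_equiv track=rewrite | github.com/TiagoDeMatosDias/EDINET | src/orchestrator/parse_taxonomy/taxonomy_processing.py | _statement_role_match_rank
-- ===== SOURCE A (Python) =====
-- def _statement_role_match_rank(role_name: str, preferred_names: tuple[str, ...]) -> int:
--     for index, preferred_name in enumerate(preferred_names):
--         if role_name == preferred_name:
--             return index
--
--     offset = len(preferred_names)
--     for index, preferred_name in enumerate(preferred_names):
--         if preferred_name and preferred_name in role_name:
--             return offset + index
--
--     return offset * 2
-- ===== SOURCE B (Python) =====
-- def _statement_role_match_rank(role_name: str, preferred_names: tuple[str, ...]) -> int: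
--     # One pass: record first exact-match index and first non-empty substring-match index.
--     exact_idx = None
--     sub_idx = None
--     for index, preferred_name in enumerate(preferred_names):
--         if exact_idx is None and role_name == preferred_name:
--             exact_idx = index
--         if sub_idx is None and preferred_name and preferred_name in role_name:
--             sub_idx = index
--     offset = len(preferred_names)
--     if exact_idx is not None:
--         return exact_idx
--     if sub_idx is not None:
--         return offset + sub_idx
--     return offset * 2
-- ===== Notes on version B (the rewrite author's own statement) =====
-- stated objective: alternative
-- what changed: Replaces A's two sequential early-returning scans with a single pass over enumerate that accumulates the first exact-match index and the first substring-match index and decides the rank afterwards.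
import Mathlib
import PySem

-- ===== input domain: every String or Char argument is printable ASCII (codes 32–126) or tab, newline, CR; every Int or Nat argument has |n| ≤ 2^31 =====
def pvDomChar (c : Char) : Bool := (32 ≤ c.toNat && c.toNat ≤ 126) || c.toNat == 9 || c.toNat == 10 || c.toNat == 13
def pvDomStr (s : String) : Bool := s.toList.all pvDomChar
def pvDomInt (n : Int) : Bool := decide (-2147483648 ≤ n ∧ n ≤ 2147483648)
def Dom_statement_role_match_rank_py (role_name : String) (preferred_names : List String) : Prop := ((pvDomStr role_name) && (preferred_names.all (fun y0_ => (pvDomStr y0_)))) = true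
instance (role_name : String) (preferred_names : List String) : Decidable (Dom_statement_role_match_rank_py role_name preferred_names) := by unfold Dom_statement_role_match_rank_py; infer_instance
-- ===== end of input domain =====

-- B replaces A's two sequential early-returning scans with a single accumulating pass; same cost, different decomposition.


-- ===== PORT A =====
-- first loop of A: early return of the index of the first exact match
def pvAExact (role_name : String) : List (Int × String) → Option Int
  | [] => none
  | (i, p) :: rest => if role_name == p then some i else pvAExact role_name rest

-- second loop of A: early return of the index of the first non-empty substring match
def pvASub (role_name : String) : List (Int × String) → Option Int
  | [] => none
  | (i, p) :: rest =>
      if p ≠ "" && PySem.Str.isIn p role_name then some i else pvASub role_name rest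

def statement_role_match_rank_py (role_name : String) (preferred_names : List String) : Int :=
  match pvAExact role_name (PySem.List.enumerate preferred_names) with
  | some i => i
  | none =>
      let offset : Int := preferred_names.length
      match pvASub role_name (PySem.List.enumerate preferred_names) with
      | some i => offset + i
      | none => offset * 2

-- ===== PORT B =====
-- one pass accumulating (first exact-match index, first substring-match index)
def pvBStep (role_name : String) (acc : Option Int × Option Int) (pr : Int × String) :
    Option Int × Option Int :=
  let e := if acc.1.isNone && (role_name == pr.2) then some pr.1 else acc.1
  let s := if acc.2.isNone && (pr.2 ≠ "" && PySem.Str.isIn pr.2 role_name) then some pr.1 else acc.2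
  (e, s)

def statement_role_match_rank_py_alt (role_name : String) (preferred_names : List String) : Int :=
  let acc := (PySem.List.enumerate preferred_names).foldl (pvBStep role_name) (none, none)
  let offset : Int := preferred_names.length
  match acc.1 with
  | some i => i
  | none =>
      match acc.2 with
      | some i => offset + i
      | none => offset * 2

-- ===== PRECONDITION & SPEC =====
def Spec_statement_role_match_rank_py (role_name : String) (preferred_names : List String) (out : Int) : Prop := out = statement_role_match_rank_py_alt role_name preferred_names
instance (role_name : String) (preferred_names : List String) (out : Int) : Decidable (Spec_statement_role_match_rank_py role_name preferred_names out) := by unfold Spec_statement_role_match_rank_py; infer_instance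

-- ===== CLAIM (what is proved, stated in full; the proofs are below) =====
def Claim_equal_statement_role_match_rank_py : Prop := ∀ (role_name : String) (preferred_names : List String), Dom_statement_role_match_rank_py role_name preferred_names → Spec_statement_role_match_rank_py role_name preferred_names (statement_role_match_rank_py role_name preferred_names)

-- ===== LEMMAS AND PROOFS =====
-- The fold computes exactly the pair (first exact match, first substring match) of A's two loops.
theorem pvFold_eq (role_name : String) (l : List (Int × String)) (e s : Option Int) :
    l.foldl (pvBStep role_name) (e, s) =
      ((match e with | some i => some i | none => pvAExact role_name l),
       (match s with | some i => some i | none => pvASub role_name l)) := by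
  induction l generalizing e s with
  | nil => cases e <;> cases s <;> rfl
  | cons hd tl ih =>
    obtain ⟨i, p⟩ := hd
    simp only [List.foldl_cons, pvBStep, pvAExact, pvASub]
    cases e <;> cases s <;>
      simp only [Option.isNone_none, Option.isNone_some, Bool.true_and, Bool.false_and,
        Bool.false_eq_true, if_false, ih] <;> split_ifs <;> simp_all

-- ===== VERDICT (by name: the statement is the Claim_ definition above) =====
theorem statement_role_match_rank_py_spec : Claim_equal_statement_role_match_rank_py := by
  intro role_name preferred_names _
  unfold Spec_statement_role_match_rank_py statement_role_match_rank_py statement_role_match_rank_py_alt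
  rw [pvFold_eq]
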